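-- pv_equiv track=rewrite | github.com/kom-senapati/bot-verse | myenv/Lib/site-packages/jinjaMarkdown/markdownExtension.py | lineBreak
-- ===== SOURCE A (Python) =====
-- def lineBreak(inputText):
--     outputText = ""
--     previousSection = 0
--     stopPharsing = -2
--     i = 0
--     while i < len(inputText):
--         if(i!=len(inputText)-1):
--             if inputText[i] == " " and inputText[i+1] == " ":
--                 outputText += "<br>"
--                 i+=2
--             else:
--                 outputText += inputText[i]
--                 i+=1
--         else:
--             outputText += inputText[i]
--             i += 1
--
--     return outputText
-- ===== SOURCE B (Python) =====
-- def lineBreak(inputText):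
--     return "<br>".join(inputText.split("  "))
-- ===== Notes on version B (the rewrite author's own statement) =====
-- stated objective: faster
-- what changed: Replaces A's index-driven character-by-character while loop with two-character lookahead and quadratic string accumulation by a single split on the two-space separator followed by a join with the break tag, with no explicit loop or index arithmetic.
import Mathlib
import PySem

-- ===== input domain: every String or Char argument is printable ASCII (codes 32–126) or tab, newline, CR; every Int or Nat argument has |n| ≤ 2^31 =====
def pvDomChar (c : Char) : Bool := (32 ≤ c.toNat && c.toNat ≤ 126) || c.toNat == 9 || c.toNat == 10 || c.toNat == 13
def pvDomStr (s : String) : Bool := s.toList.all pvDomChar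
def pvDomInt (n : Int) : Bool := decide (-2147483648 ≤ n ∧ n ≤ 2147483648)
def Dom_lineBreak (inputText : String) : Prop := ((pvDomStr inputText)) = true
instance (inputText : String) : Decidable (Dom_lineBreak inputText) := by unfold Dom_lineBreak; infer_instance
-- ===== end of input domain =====

-- B replaces A's index-driven while loop (two-char lookahead, += accumulation) by
-- idiomatic split-on-"  " + "<br>".join; equal return values, A is total.


-- ===== PORT A =====
-- A's while loop: at each position, if not at the last character and the current and
-- next characters are both spaces, append "<br>" and advance by 2; otherwise append
-- the current character and advance by 1. 'outputText' is the accumulator.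
def lineBreakGo (acc : List Char) : List Char → List Char
  | [] => acc
  | [c] => acc ++ [c]                                  -- i == len-1 branch
  | c1 :: c2 :: rest =>
      if c1 = ' ' ∧ c2 = ' ' then lineBreakGo (acc ++ "<br>".toList) rest
      else lineBreakGo (acc ++ [c1]) (c2 :: rest)

def lineBreak (inputText : String) : String :=
  String.ofList (lineBreakGo [] inputText.toList)

-- ===== PORT B =====
-- Source B: return "<br>".join(inputText.split("  "))  (sep is a nonempty literal, so split? is some)
def lineBreak_alt (inputText : String) : String :=
  PySem.Str.join "<br>" ((PySem.Str.split? inputText "  ").getD [])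

-- ===== PRECONDITION & SPEC =====
def Spec_lineBreak (inputText : String) (out : String) : Prop := out = lineBreak_alt inputText
instance (inputText : String) (out : String) : Decidable (Spec_lineBreak inputText out) := by unfold Spec_lineBreak; infer_instance

-- ===== CLAIM (what is proved, stated in full; the proofs are below) =====
def Claim_equal_lineBreak : Prop := ∀ (inputText : String), Dom_lineBreak inputText → Spec_lineBreak inputText (lineBreak inputText)

-- ===== LEMMAS AND PROOFS =====

-- Accumulator-free form of A's loop.
def pvRepl : List Char → List Char
  | [] => []
  | [c] => [c]
  | c1 :: c2 :: rest =>
      if c1 = ' ' ∧ c2 = ' ' then "<br>".toList ++ pvRepl rest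
      else c1 :: pvRepl (c2 :: rest)

theorem lineBreakGo_eq (l : List Char) : ∀ acc, lineBreakGo acc l = acc ++ pvRepl l := by
  induction l using pvRepl.induct with
  | case1 => intro acc; simp [lineBreakGo, pvRepl]
  | case2 c => intro acc; simp [lineBreakGo, pvRepl]
  | case3 c1 c2 rest h ih =>
      intro acc; simp [lineBreakGo, pvRepl, h, ih]
  | case4 c1 c2 rest h ih =>
      intro acc; simp [lineBreakGo, pvRepl, h, ih]

-- Simple fuel-free form of PySem.Chars.splitOn.go for the fixed separator [' ',' '].
def pvSsp : List Char → List Char → List (List Char)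
  | [], cur => [cur.reverse]
  | [c], cur => [(c :: cur).reverse]
  | c1 :: c2 :: rest, cur =>
      if c1 = ' ' ∧ c2 = ' ' then cur.reverse :: pvSsp rest []
      else pvSsp (c2 :: rest) (c1 :: cur)

theorem pvSsp_ne_nil (l cur : List Char) : pvSsp l cur ≠ [] := by
  induction l, cur using pvSsp.induct with
  | case1 cur => simp [pvSsp]
  | case2 c cur => simp [pvSsp]
  | case3 c1 c2 rest cur h ih => simp [pvSsp, h]
  | case4 c1 c2 rest cur h ih => simpa [pvSsp, h] using ih

theorem go_eq_pvSsp : ∀ fuel l cur acc, l.length ≤ fuel →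
    PySem.Chars.splitOn.go [' ', ' '] fuel l cur acc = acc.reverse ++ pvSsp l cur := by
  intro fuel
  induction fuel with
  | zero =>
      intro l cur acc h
      have : l = [] := List.length_eq_zero_iff.mp (Nat.le_zero.mp h)
      subst this
      simp [PySem.Chars.splitOn.go, pvSsp]
  | succ n ih =>
      intro l cur acc h
      match l with
      | [] => simp [PySem.Chars.splitOn.go, pvSsp]
      | [c] =>
          have hpre : ([' ', ' '] : List Char).isPrefixOf [c] = false := by
            simp [List.isPrefixOf]
          simp only [PySem.Chars.splitOn.go, hpre]
          rw [ih [] (c :: cur) acc (by simp)]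
          simp [pvSsp]
      | c1 :: c2 :: rest =>
          by_cases hsp : c1 = ' ' ∧ c2 = ' '
          · obtain ⟨h1, h2⟩ := hsp
            subst h1; subst h2
            have hpre : ([' ', ' '] : List Char).isPrefixOf (' ' :: ' ' :: rest) = true := by
              simp [List.isPrefixOf]
            simp only [PySem.Chars.splitOn.go, hpre, if_pos]
            rw [ih _ [] (cur.reverse :: acc) (by simp at h ⊢; omega)]
            simp [pvSsp]
          · have hpre : ([' ', ' '] : List Char).isPrefixOf (c1 :: c2 :: rest) = false := by
              rw [Bool.eq_false_iff]
              intro hc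
              simp only [List.isPrefixOf, Bool.and_eq_true, beq_iff_eq] at hc
              exact hsp ⟨hc.1.symm, hc.2.1.symm⟩
            simp only [PySem.Chars.splitOn.go, hpre]
            rw [ih (c2 :: rest) (c1 :: cur) acc (by simp at h ⊢; omega)]
            simp [pvSsp, hsp]

theorem splitOn_eq (l : List Char) :
    PySem.Chars.splitOn l [' ', ' '] = pvSsp l [] := by
  unfold PySem.Chars.splitOn
  rw [go_eq_pvSsp (l.length + 1) l [] [] (by omega)]
  simp

theorem join_pvSsp (l cur : List Char) :
    PySem.Chars.join "<br>".toList (pvSsp l cur) = cur.reverse ++ pvRepl l := by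
  induction l, cur using pvSsp.induct with
  | case1 cur => simp [pvSsp, pvRepl, PySem.Chars.join, List.intercalate]
  | case2 c cur => simp [pvSsp, pvRepl, PySem.Chars.join, List.intercalate]
  | case3 c1 c2 rest cur h ih =>
      obtain ⟨rfl, rfl⟩ := h
      obtain ⟨p, ps, hps⟩ : ∃ p ps, pvSsp rest [] = p :: ps := by
        cases hrest : pvSsp rest [] with
        | nil => exact absurd hrest (pvSsp_ne_nil rest [])
        | cons p ps => exact ⟨p, ps, rfl⟩
      rw [show pvSsp (' ' :: ' ' :: rest) cur = cur.reverse :: pvSsp rest [] from by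
        simp [pvSsp], hps,
        show pvRepl (' ' :: ' ' :: rest) = "<br>".toList ++ pvRepl rest from by
        simp [pvRepl]]
      simp only [PySem.Chars.join, List.intercalate] at ih ⊢
      rw [hps] at ih
      rw [show List.intersperse "<br>".toList (cur.reverse :: p :: ps)
            = cur.reverse :: "<br>".toList :: List.intersperse "<br>".toList (p :: ps) from by
        simp [List.intersperse]]
      have ih' : (List.intersperse ['<','b','r','>'] (p :: ps)).flatten = pvRepl rest := by
        simpa using ih
      simp [ih']
  | case4 c1 c2 rest cur h ih =>
      simp only [pvSsp, pvRepl, if_neg h]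
      rw [ih]
      simp

theorem lineBreak_alt_eq (s : String) :
    lineBreak_alt s = String.ofList ("<br>".toList.intercalate (pvSsp s.toList [])) := by
  unfold lineBreak_alt
  have hsep : ("  " : String).toList = [' ', ' '] := by decide
  simp only [PySem.Str.split?, PySem.Chars.split?, hsep]
  simp only [List.isEmpty_cons]
  simp [PySem.Str.join, PySem.Chars.join, splitOn_eq, Function.comp_def,
    String.toList_ofList]

-- ===== VERDICT (by name: the statement is the Claim_ definition above) =====
theorem lineBreak_spec : Claim_equal_lineBreak := by
  intro s _
  unfold Spec_lineBreak
  rw [lineBreak_alt_eq]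
  unfold lineBreak
  rw [lineBreakGo_eq]
  have h := join_pvSsp s.toList []
  simp only [PySem.Chars.join] at h
  rw [h]
  simp
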